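-- pv_equiv track=rewrite | github.com/brodoluca/ATS | Simulation/Simulation_MPC_for_s_analysis.py | convert_to_time_list
-- ===== SOURCE A (Python) =====
-- def convert_to_time_list(requests, N):
--     # Calculate the number of requests per interval
--     requests_per_interval = len(requests) // N
--     # Initialize a dictionary to store requests for each time interval
--     time_requests = {t: [] for t in range(N)}
--
--     # Iterate over each time interval
--     for t in range(N):
--         # Calculate the start and end indices for the requests in this interval
--         start_index = t * requests_per_interval
--         end_index = (t + 1) * requests_per_interval
--
--         # Add requests to the current time interval
--         time_requests[t] = requests[start_index:end_index]
--
--     return time_requests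
-- ===== SOURCE B (Python) =====
-- def convert_to_time_list(requests, N):
--     # One pass: scatter each request into its bucket by index arithmetic,
--     # instead of slicing the list once per interval.
--     rpi = len(requests) // N
--     buckets = [[] for _ in range(N)]
--     if rpi > 0:
--         for i, r in enumerate(requests):
--             b = i // rpi
--             if b < N:
--                 buckets[b].append(r)
--     return {t: bucket for t, bucket in enumerate(buckets)}
-- ===== Notes on version B (the rewrite author's own statement) =====
-- stated objective: alternative
-- what changed: A slices the requests list once per interval (dict pre-init then overwrite each key with requests[t*rpi:(t+1)*rpi]); B makes a single enumerate pass that scatters each request into its interval's bucket by index arithmetic (i // rpi), dropping tail elements and guarding the degenerate rpi == 0 case, then returns the buckets keyed by interval.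
import Mathlib
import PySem

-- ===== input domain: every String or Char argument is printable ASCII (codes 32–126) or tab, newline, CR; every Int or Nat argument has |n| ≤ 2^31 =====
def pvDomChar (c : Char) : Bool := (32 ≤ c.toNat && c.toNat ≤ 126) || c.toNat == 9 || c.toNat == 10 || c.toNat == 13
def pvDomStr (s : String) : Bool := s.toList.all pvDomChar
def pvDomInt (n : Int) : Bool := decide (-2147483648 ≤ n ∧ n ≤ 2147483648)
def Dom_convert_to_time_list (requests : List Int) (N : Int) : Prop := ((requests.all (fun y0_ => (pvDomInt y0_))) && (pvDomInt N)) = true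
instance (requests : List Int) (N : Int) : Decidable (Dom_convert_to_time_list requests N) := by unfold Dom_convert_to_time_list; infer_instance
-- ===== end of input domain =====

-- B replaces A's per-interval slicing with a single scatter pass that files each request
-- into its interval's bucket by index arithmetic (alternative decomposition, same cost).


-- ===== PORT A =====
def convert_to_time_list (requests : List Int) (N : Int) : List (Int × List Int) :=
  let requests_per_interval := PySem.Int.floordiv (PySem.List.len requests) N
  let time_requests : PySem.Dict Int (List Int) :=
    (PySem.List.pyRange 0 N).foldl (fun d t => d.insert t ([] : List Int)) PySem.Dict.empty
  let time_requests :=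
    (PySem.List.pyRange 0 N).foldl
      (fun d t =>
        d.insert t (PySem.List.slice requests (some (t * requests_per_interval))
          (some ((t + 1) * requests_per_interval))))
      time_requests
  time_requests.items

-- ===== PORT B =====
def convert_to_time_list_alt (requests : List Int) (N : Int) : List (Int × List Int) :=
  let rpi := PySem.Int.floordiv (PySem.List.len requests) N
  let buckets0 : List (List Int) := (PySem.List.pyRange 0 N).map (fun _ => ([] : List Int))
  let buckets :=
    if 0 < rpi then
      (PySem.List.enumerate requests).foldl
        (fun bs p =>
          let b := PySem.Int.floordiv p.1 rpi
          if b < N then bs.set b.toNat (PySem.List.pyGetD bs b [] ++ [p.2]) else bs)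
        buckets0
    else buckets0
  PySem.List.enumerate buckets

-- ===== PRECONDITION & SPEC =====
-- Pre_ excludes only N = 0, where Python A raises ZeroDivisionError at `len(requests) // N`.
def Pre_convert_to_time_list (requests : List Int) (N : Int) : Prop := N ≠ 0
instance (requests : List Int) (N : Int) : Decidable (Pre_convert_to_time_list requests N) := by unfold Pre_convert_to_time_list; infer_instance
def pvWitness_convert_to_time_list : List Int × Int := ([3, 1, 4, 1, 5], 2)

def Spec_convert_to_time_list (requests : List Int) (N : Int) (out : List (Int × List Int)) : Prop := out = convert_to_time_list_alt requests N
instance (requests : List Int) (N : Int) (out : List (Int × List Int)) : Decidable (Spec_convert_to_time_list requests N out) := by unfold Spec_convert_to_time_list; infer_instance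

-- ===== CLAIM (what is proved, stated in full; the proofs are below) =====
def Claim_equal_convert_to_time_list : Prop := ∀ (requests : List Int) (N : Int), Dom_convert_to_time_list requests N → Pre_convert_to_time_list requests N → Spec_convert_to_time_list requests N (convert_to_time_list requests N)

-- ===== LEMMAS AND PROOFS =====

-- A set built from a duplicate-free list is that list.
theorem pv_ofList_eq_self {ts : List Int} (h : ts.Nodup) : PySem.Set.ofList ts = ts := by
  induction ts with
  | nil => rfl
  | cons t ts ih =>
    rw [PySem.Set.ofList_cons, ih h.of_cons]
    have hnot : t ∉ ts := (List.nodup_cons.mp h).1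
    simp only [PySem.Set.discard, List.cons.injEq, true_and]
    rw [List.filter_eq_self]
    intro a ha
    have : a ≠ t := fun he => hnot (he ▸ ha)
    simpa using this

-- getD after an insert-fold whose key list avoids the key.
theorem pv_getD_foldl_insert_not_mem (v : Int → List Int) (ts : List Int) (d : PySem.Dict Int (List Int))
    (t : Int) (h : t ∉ ts) :
    (ts.foldl (fun d s => d.insert s (v s)) d).getD t [] = d.getD t [] := by
  induction ts generalizing d with
  | nil => rfl
  | cons s ts ih =>
    simp only [List.foldl_cons]
    rw [ih _ (fun hm => h (List.mem_cons_of_mem _ hm)), PySem.Dict.getD_insert]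
    simp only [List.mem_cons, not_or] at h
    simp [h.1]

-- getD after an insert-fold over duplicate-free keys: a listed key gets its value.
theorem pv_getD_foldl_insert_mem (v : Int → List Int) (ts : List Int) (d : PySem.Dict Int (List Int))
    (t : Int) (hnd : ts.Nodup) (h : t ∈ ts) :
    (ts.foldl (fun d s => d.insert s (v s)) d).getD t [] = v t := by
  induction ts generalizing d with
  | nil => cases h
  | cons s ts ih =>
    simp only [List.foldl_cons]
    rcases List.mem_cons.mp h with rfl | hm
    · rw [pv_getD_foldl_insert_not_mem v ts _ t (List.nodup_cons.mp hnd).1, PySem.Dict.getD_insert]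
      simp
    · exact ih _ hnd.of_cons hm

-- A's shape: init-dict fold then overwrite fold, from empty, read back as items.
theorem pv_items_double_fold (ts : List Int) (hnd : ts.Nodup) (v w : Int → List Int) :
    ((ts.foldl (fun d t => d.insert t (w t))
        (ts.foldl (fun d t => d.insert t (v t)) (PySem.Dict.empty : PySem.Dict Int (List Int)))).items)
      = ts.map (fun t => (t, w t)) := by
  have hk1 : (ts.foldl (fun d t => d.insert t (v t)) (PySem.Dict.empty : PySem.Dict Int (List Int))).keys = ts := by
    rw [PySem.Dict.keys_foldl_insert ts (fun _ t => v t)]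
    show PySem.Set.update (PySem.Dict.empty : PySem.Dict Int (List Int)).keys ts = ts
    rw [show (PySem.Dict.empty : PySem.Dict Int (List Int)).keys = [] from rfl,
      PySem.Set.update_nil_left, pv_ofList_eq_self hnd]
  have hk2 : (ts.foldl (fun d t => d.insert t (w t))
      (ts.foldl (fun d t => d.insert t (v t)) (PySem.Dict.empty : PySem.Dict Int (List Int)))).keys = ts := by
    rw [PySem.Dict.keys_foldl_insert ts (fun _ t => w t), hk1,
      PySem.Set.update_eq_append_filter, pv_ofList_eq_self hnd]
    rw [List.filter_eq_nil_iff.mpr, List.append_nil]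
    intro a ha
    simp [PySem.Set.contains, ha]
  rw [PySem.Dict.items_eq_map_keys _ (by rw [hk2]; exact hnd) [], hk2]
  exact List.map_congr_left fun t ht => by
    rw [pv_getD_foldl_insert_mem w ts _ t hnd ht]

-- enumerate of a map over List.range.
theorem pv_enumerate_map_range {α : Type} (f : Nat → α) (n : Nat) :
    PySem.List.enumerate ((List.range n).map f) =
      (List.range n).map (fun (t : Nat) => ((t : Int), f t)) := by
  induction n with
  | zero => rfl
  | succ n ih =>
    rw [List.range_succ, List.map_append, List.map_append,
      PySem.List.enumerate_append, ih]
    simp [PySem.List.enumerate]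

-- B's scatter step keeps an empty bucket list empty.
theorem pv_foldl_set_nil (N rpi : Int) (l : List (Int × Int)) :
    l.foldl
      (fun (bs : List (List Int)) p =>
        if PySem.Int.floordiv p.1 rpi < N
        then bs.set (PySem.Int.floordiv p.1 rpi).toNat
          (PySem.List.pyGetD bs (PySem.Int.floordiv p.1 rpi) [] ++ [p.2]) else bs)
      [] = [] := by
  induction l with
  | nil => rfl
  | cons p l ih => simpa using ih

-- Core invariant of B's scatter loop: after the first k requests, bucket t holds the
-- part of requests[t*r:(t+1)*r] whose index is below k.
theorem pv_scatter_inv (requests : List Int) (n r : Nat) (hr : 0 < r) (k : Nat)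
    (hk : k ≤ requests.length) :
    (PySem.List.enumerate (requests.take k)).foldl
      (fun (bs : List (List Int)) p =>
        if PySem.Int.floordiv p.1 (r : Int) < (n : Int)
        then bs.set (PySem.Int.floordiv p.1 (r : Int)).toNat
          (PySem.List.pyGetD bs (PySem.Int.floordiv p.1 (r : Int)) [] ++ [p.2]) else bs)
      ((List.range n).map fun _ => ([] : List Int))
    = (List.range n).map
        (fun t => List.take (min ((t + 1) * r) k - t * r) (List.drop (t * r) requests)) := by
  induction k with
  | zero => simp
  | succ k ih =>
    have hklt : k < requests.length := hk
    have ihk := ih (Nat.le_of_lt hklt)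
    rw [List.take_add_one, List.getElem?_eq_getElem hklt]
    rw [show (some requests[k]).toList = [requests[k]] from rfl]
    rw [PySem.List.enumerate_append, List.foldl_append, ihk]
    have hlen : (requests.take k).length = k := by
      simp [Nat.le_of_lt hklt]
    rw [hlen]
    simp only [PySem.List.enumerate, List.foldl_cons, List.foldl_nil]
    have hdiv : PySem.Int.floordiv ((0 : Int) + (k : Int)) (r : Int) = ((k / r : Nat) : Int) := by
      rw [zero_add]; exact PySem.Int.floordiv_natCast k r
    rw [hdiv]
    have hdm : k / r * r + k % r = k := Nat.div_add_mod' k r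
    have hmlt := Nat.mod_lt k hr
    have hle : (k / r) * r ≤ k := by omega
    have hsucc : (k / r + 1) * r = k / r * r + r := by ring
    have hlt : k < (k / r + 1) * r := by omega
    by_cases hb : ((k / r : Nat) : Int) < (n : Int)
    · have hbn : k / r < n := by exact_mod_cast hb
      simp only [hb, if_true, Int.toNat_natCast]
      rw [PySem.List.pyGetD_of_nonneg _ _ (by positivity), Int.toNat_natCast,
        PySem.List.getD_map_range _ _ _ _ hbn]
      apply List.ext_getElem
      · simp
      · intro j hj1 hj2
        simp only [List.length_set, List.length_map, List.length_range] at hj1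
        rw [List.getElem_set]
        simp only [List.getElem_map, List.getElem_range]
        by_cases hjb : k / r = j
        · subst hjb
          simp only [if_true]
          have hmin1 : min ((k / r + 1) * r) k = k := by omega
          have hmin2 : min ((k / r + 1) * r) (k + 1) = k + 1 := by omega
          rw [hmin1, hmin2]
          have hk1 : k + 1 - k / r * r = (k - k / r * r) + 1 := by omega
          rw [hk1, List.take_add_one, List.getElem?_drop]
          have : k / r * r + (k - k / r * r) = k := by omega
          rw [this, List.getElem?_eq_getElem hklt]
          rfl
        · simp only [hjb, if_false]
          congr 1
          rcases Nat.lt_or_ge j (k / r) with hj | hj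
          · have h1 : (j + 1) * r ≤ (k / r) * r := Nat.mul_le_mul_right r (by omega)
            omega
          · have hj' : k / r < j := by omega
            have h2 : k < j * r := (Nat.div_lt_iff_lt_mul hr).mp hj'
            have h3 : j * r ≤ (j + 1) * r := by
              have : (j + 1) * r = j * r + r := by ring
              omega
            omega
    · simp only [hb, if_false]
      apply List.map_congr_left
      intro t ht
      have htn : t < n := List.mem_range.mp ht
      have hbn : n ≤ k / r := by
        rw [not_lt] at hb
        exact_mod_cast hb
      have h1 : (t + 1) * r ≤ (k / r) * r := Nat.mul_le_mul_right r (by omega)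
      congr 1
      omega

-- The two ports agree on every N ≠ 0.
theorem pv_main (requests : List Int) (N : Int) (hN : N ≠ 0) :
    convert_to_time_list requests N = convert_to_time_list_alt requests N := by
  rcases lt_or_gt_of_ne hN with hneg | hpos
  · -- N < 0: both ports return the empty association list
    simp only [convert_to_time_list, convert_to_time_list_alt,
      PySem.List.pyRange_one_eq_nil (le_of_lt hneg), List.foldl_nil, List.map_nil]
    rw [pv_foldl_set_nil]
    simp only [ite_self]
    rfl
  · -- N > 0
    obtain ⟨n, rfl⟩ : ∃ n : Nat, N = (n : Int) := ⟨N.toNat, (Int.toNat_of_nonneg (le_of_lt hpos)).symm⟩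
    have hn : 0 < n := by exact_mod_cast hpos
    simp only [convert_to_time_list, convert_to_time_list_alt, PySem.List.len_eq,
      PySem.Int.floordiv_natCast]
    generalize requests.length / n = r
    have hrange : PySem.List.pyRange 0 (n : Int) = (List.range n).map (fun (k : Nat) => (k : Int)) := by
      rw [PySem.List.pyRange_one]; simp only [zero_add, sub_zero, Int.toNat_natCast]
    rw [pv_items_double_fold _ (PySem.List.nodup_pyRange_one 0 (n : Int)), hrange,
      List.map_map, List.map_map]
    have hA : ((List.range n).map
        ((fun t => (t, PySem.List.slice requests (some (t * (r : Int))) (some ((t + 1) * (r : Int))))) ∘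
          (fun (k : Nat) => (k : Int))))
        = (List.range n).map (fun (k : Nat) => ((k : Int), List.take r (List.drop (k * r) requests))) := by
      apply List.map_congr_left
      intro k _
      simp only [Function.comp_apply]
      have h1 : (k : Int) * (r : Int) = ((k * r : Nat) : Int) := by push_cast; ring
      have h2 : ((k : Int) + 1) * (r : Int) = (((k + 1) * r : Nat) : Int) := by push_cast; ring
      rw [h1, h2, PySem.List.slice_natCast]
      have h3 : (k + 1) * r - k * r = r := by
        have : (k + 1) * r = k * r + r := by ring
        omega
      rw [h3]
    rw [hA,
      show ((fun x => ([] : List Int)) ∘ (fun (k : Nat) => (k : Int))) = (fun (_ : Nat) => ([] : List Int)) from rfl]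
    by_cases hrpos : 0 < r
    · rw [if_pos (by exact_mod_cast hrpos)]
      have := pv_scatter_inv requests n r hrpos requests.length le_rfl
      rw [List.take_length] at this
      rw [this, pv_enumerate_map_range]
      apply List.map_congr_left
      intro t _
      have hsucc : (t + 1) * r = t * r + r := by ring
      congr 1
      rw [List.take_eq_take_iff]
      simp only [List.length_drop]
      omega
    · rw [if_neg (by exact_mod_cast hrpos)]
      rw [pv_enumerate_map_range]
      apply List.map_congr_left
      intro t _
      have hr0 : r = 0 := Nat.eq_zero_of_not_pos hrpos
      simp [hr0]

-- ===== VERDICT (by name: the statement is the Claim_ definition above) =====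
theorem convert_to_time_list_spec : Claim_equal_convert_to_time_list := by
  intro requests N _ hpre
  exact pv_main requests N hpre
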